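-- pv_equiv track=rewrite | github.com/jinyes-kim/Algorithm | programmers/모의고사.py | solution
-- ===== SOURCE A (Python) =====
-- def solution(answers):
--     score_list = [0, 0, 0]
--     length = len(answers)
--     first_omr = first_man(length)
--     second_omr = second_man(length)
--     third_omr = third_man(length)
--
--     for num in range(length):
--         question = answers[num]
--         if first_omr[num] == question:
--             score_list[0] += 1
--         if second_omr[num] == question:
--             score_list[1] += 1
--         if third_omr[num] == question:
--             score_list[2] += 1
--
--     maximum_score = max(score_list)
--     answer = []
--     for n in range(3):
--         if score_list[n] == maximum_score:
--             answer.append(n+1)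
--
--     return answer
--
-- def first_man(length):
--     res = []
--
--     for n in range(0, length):
--         res.append((n % 5)+1)
--     return res
--
-- def second_man(length):
--     res = []
--
--     for n in range(0, length+1):
--         if len(res) >= length:
--             break
--
--         num = (n % 5) + 1
--         if num == 2:
--             continue
--         else:
--             res.append(2)
--             res.append(num)
--
--     return res
--
-- def third_man(length):
--     res = [3, 3]
--
--     for n in range(0, length+1):
--         if len(res) >= length:
--             break
--
--         num = (n % 5) + 1
--         if num == 3:
--             continue
--         else:
--             res.extend([num, num])
--             if num == 5:
--                 res.extend([3, 3])
--
--     return res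
-- ===== SOURCE B (Python) =====
-- def solution(answers):
--     patterns = [[1, 2, 3, 4, 5], [2, 1, 2, 3, 2, 4, 2, 5], [3, 3, 1, 1, 2, 2, 4, 4, 5, 5]]
--     scores = [sum(1 for i, a in enumerate(answers) if p[i % len(p)] == a) for p in patterns]
--     m = max(scores)
--     return [k + 1 for k in range(3) if scores[k] == m]
-- ===== Notes on version B (the rewrite author's own statement) =====
-- stated objective: idiomatic
-- what changed: Replaces the three bespoke pattern-list builder functions and the single interleaved indexing loop with three fixed cycle constants indexed by i % len(cycle), scoring each student in its own pass over enumerate(answers); no length-n pattern lists are built.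
import Mathlib
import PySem

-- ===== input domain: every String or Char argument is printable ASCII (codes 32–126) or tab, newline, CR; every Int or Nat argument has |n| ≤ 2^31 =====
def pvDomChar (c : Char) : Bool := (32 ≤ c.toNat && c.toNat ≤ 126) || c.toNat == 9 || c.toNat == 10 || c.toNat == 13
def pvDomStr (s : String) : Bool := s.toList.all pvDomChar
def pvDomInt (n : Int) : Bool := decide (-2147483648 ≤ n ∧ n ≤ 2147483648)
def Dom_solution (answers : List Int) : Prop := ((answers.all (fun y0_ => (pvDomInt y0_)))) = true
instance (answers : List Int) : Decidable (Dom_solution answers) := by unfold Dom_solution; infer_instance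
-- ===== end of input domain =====

-- B replaces the three bespoke pattern-list builders and the interleaved scoring loop with
-- fixed cycle constants indexed modulo their length, one scoring pass per student (idiomatic).

-- ===== PORT A =====
def first_man (length : Int) : List Int :=
  (PySem.List.pyRange 0 length 1).foldl (fun res n => res ++ [PySem.Int.mod n 5 + 1]) []

def second_man_loop (length : Int) : List Int → List Int → List Int
  | [], res => res
  | n :: rest, res =>
    if (res.length : Int) ≥ length then res
    else
      let num := PySem.Int.mod n 5 + 1
      if num == 2 then second_man_loop length rest res
      else second_man_loop length rest (res ++ [2, num])

def second_man (length : Int) : List Int :=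
  second_man_loop length (PySem.List.pyRange 0 (length + 1) 1) []

def third_man_loop (length : Int) : List Int → List Int → List Int
  | [], res => res
  | n :: rest, res =>
    if (res.length : Int) ≥ length then res
    else
      let num := PySem.Int.mod n 5 + 1
      if num == 3 then third_man_loop length rest res
      else
        let res1 := res ++ [num, num]
        let res2 := if num == 5 then res1 ++ [3, 3] else res1
        third_man_loop length rest res2

def third_man (length : Int) : List Int :=
  third_man_loop length (PySem.List.pyRange 0 (length + 1) 1) [3, 3]

def solution (answers : List Int) : List Int :=
  let length : Int := (answers.length : Int)
  let first_omr := first_man length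
  let second_omr := second_man length
  let third_omr := third_man length
  let score_list : List Int :=
    (PySem.List.pyRange 0 length 1).foldl (fun sl num =>
      -- all indices are in range here, so pyGetD agrees with Python's indexing
      let question := PySem.List.pyGetD answers num 0
      let sl := if PySem.List.pyGetD first_omr num 0 == question then sl.set 0 (sl.getD 0 0 + 1) else sl
      let sl := if PySem.List.pyGetD second_omr num 0 == question then sl.set 1 (sl.getD 1 0 + 1) else sl
      let sl := if PySem.List.pyGetD third_omr num 0 == question then sl.set 2 (sl.getD 2 0 + 1) else sl
      sl) [0, 0, 0]
  let maximum_score := (PySem.List.max? score_list (fun x => x)).getD 0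
  (PySem.List.pyRange 0 3 1).foldl (fun answer n =>
    if PySem.List.pyGetD score_list n 0 == maximum_score then answer ++ [n + 1] else answer) []

-- ===== PORT B =====
def countScore (answers : List Int) (p : List Int) : Int :=
  (PySem.List.enumerate answers 0).foldl (fun s ia =>
    if PySem.List.pyGetD p (PySem.Int.mod ia.1 (p.length : Int)) 0 == ia.2 then s + 1 else s) 0

def solution_alt (answers : List Int) : List Int :=
  let patterns : List (List Int) :=
    [[1, 2, 3, 4, 5], [2, 1, 2, 3, 2, 4, 2, 5], [3, 3, 1, 1, 2, 2, 4, 4, 5, 5]]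
  let scores := patterns.map (fun p => countScore answers p)
  let m := (PySem.List.max? scores (fun x => x)).getD 0
  ((List.range 3).filter (fun k => scores.getD k 0 == m)).map (fun (k : Nat) => ((k : Int) + 1))

-- ===== PRECONDITION & SPEC =====
def Spec_solution (answers : List Int) (out : List Int) : Prop := out = solution_alt answers
instance (answers : List Int) (out : List Int) : Decidable (Spec_solution answers out) := by unfold Spec_solution; infer_instance

-- ===== CLAIM (what is proved, stated in full; the proofs are below) =====
def Claim_equal_solution : Prop := ∀ (answers : List Int), Dom_solution answers → Spec_solution answers (solution answers)

-- ===== LEMMAS AND PROOFS =====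

-- the running count of matches of a cyclic pattern against the first n answers
def cnt (c : List Int) (answers : List Int) (n : Nat) : Int :=
  (((List.range n).filter (fun i => c.getD (i % c.length) 0 == answers.getD i 0)).length : Int)

-- idealised left-to-right builders mirroring the three generator loops (no break)
def g2 : Nat → List Int
  | 0 => []
  | k + 1 => g2 k ++ (if k % 5 = 1 then [] else [2, ((k % 5 : Nat) : Int) + 1])

def g3 : Nat → List Int
  | 0 => [3, 3]
  | k + 1 => g3 k ++ (if k % 5 = 2 then []
      else if k % 5 = 4 then [5, 5, 3, 3]
      else [((k % 5 : Nat) : Int) + 1, ((k % 5 : Nat) : Int) + 1])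

theorem cnt_succ (c answers : List Int) (n : Nat) :
    cnt c answers (n + 1) =
      cnt c answers n + (if c.getD (n % c.length) 0 == answers.getD n 0 then 1 else 0) := by
  unfold cnt
  rw [List.range_succ, List.filter_append]
  cases hb : (c.getD (n % c.length) 0 == answers.getD n 0) <;>
    simp only [List.getD_eq_getElem?_getD] at hb <;>
    simp [List.filter_singleton, hb]

-- indexing a flattened replication is indexing the cycle modulo its length
theorem getD_flatten_replicate (c : List Int) (q i : Nat) (h : i < q * c.length) :
    ((List.replicate q c).flatten).getD i 0 = c.getD (i % c.length) 0 := by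
  rcases Nat.eq_zero_or_pos c.length with h0 | hc
  · rw [h0, Nat.mul_zero] at h; omega
  induction q generalizing i with
  | zero => omega
  | succ q ih =>
    have hexp : (q + 1) * c.length = q * c.length + c.length := by ring
    rw [hexp] at h
    rw [List.replicate_succ, List.flatten_cons]
    by_cases hi : i < c.length
    · rw [List.getD_append _ _ _ _ hi, Nat.mod_eq_of_lt hi]
    · rw [List.getD_append_right _ _ _ _ (by omega)]
      have hmod : i % c.length = (i - c.length) % c.length := by
        conv_lhs => rw [show i = c.length + (i - c.length) from by omega]
        rw [Nat.add_mod_left]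
      rw [hmod]
      exact ih _ (by omega)

-- ---- generator 2 ----
theorem g2_skip (k : Nat) (h : k % 5 = 1) : g2 (k + 1) = g2 k := by simp [g2, h]

theorem g2_add_five (k : Nat) (h : k % 5 = 0) :
    g2 (k + 5) = g2 k ++ [2, 1, 2, 3, 2, 4, 2, 5] := by
  have e1 : g2 (k + 1) = g2 k ++ [2, 1] := by
    have h0 : ¬ k % 5 = 1 := by omega
    have : k % 5 = 0 := h
    simp [g2, h0, this]
  have e2 : g2 (k + 2) = g2 (k + 1) := g2_skip (k + 1) (by omega)
  have e3 : g2 (k + 3) = g2 (k + 2) ++ [2, 3] := by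
    have h0 : ¬ (k + 2) % 5 = 1 := by omega
    have h2 : (k + 2) % 5 = 2 := by omega
    show g2 ((k + 2) + 1) = _
    simp [g2, h0, h2]
  have e4 : g2 (k + 4) = g2 (k + 3) ++ [2, 4] := by
    have h0 : ¬ (k + 3) % 5 = 1 := by omega
    have h3 : (k + 3) % 5 = 3 := by omega
    show g2 ((k + 3) + 1) = _
    simp [g2, h0, h3]
  have e5 : g2 (k + 5) = g2 (k + 4) ++ [2, 5] := by
    have h0 : ¬ (k + 4) % 5 = 1 := by omega
    have h4 : (k + 4) % 5 = 4 := by omega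
    show g2 ((k + 4) + 1) = _
    simp [g2, h0, h4]
  rw [e5, e4, e3, e2, e1]
  simp

theorem g2_five_mul (q : Nat) :
    g2 (5 * q) = (List.replicate q ([2, 1, 2, 3, 2, 4, 2, 5] : List Int)).flatten := by
  induction q with
  | zero => rfl
  | succ q ih =>
    rw [show 5 * (q + 1) = 5 * q + 5 from by ring, g2_add_five (5 * q) (by omega), ih,
      List.replicate_succ', List.flatten_append]
    simp

theorem g2_prefix (k m : Nat) (h : k ≤ m) : g2 k <+: g2 m := by
  induction m with
  | zero => have : k = 0 := by omega
            subst this; exact List.prefix_rfl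
  | succ m ih =>
    rcases Nat.lt_or_ge k (m + 1) with hk | hk
    · exact (ih (by omega)).trans (by simp [g2])
    · have : k = m + 1 := by omega
      subst this; exact List.prefix_rfl

theorem g2_length (k : Nat) : (g2 k).length = 2 * k - 2 * ((k + 3) / 5) := by
  induction k with
  | zero => rfl
  | succ k ih => by_cases h : k % 5 = 1 <;> simp [g2, h, ih] <;> omega

-- ---- generator 3 ----
theorem g3_skip (k : Nat) (h : k % 5 = 2) : g3 (k + 1) = g3 k := by simp [g3, h]

theorem g3_add_five (k : Nat) (h : k % 5 = 0) :
    g3 (k + 5) = g3 k ++ [1, 1, 2, 2, 4, 4, 5, 5, 3, 3] := by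
  have e1 : g3 (k + 1) = g3 k ++ [1, 1] := by
    have h2 : ¬ k % 5 = 2 := by omega
    have h4 : ¬ k % 5 = 4 := by omega
    simp [g3, h2, h4, h]
  have e2 : g3 (k + 2) = g3 (k + 1) ++ [2, 2] := by
    have h2 : ¬ (k + 1) % 5 = 2 := by omega
    have h4 : ¬ (k + 1) % 5 = 4 := by omega
    have h1 : (k + 1) % 5 = 1 := by omega
    show g3 ((k + 1) + 1) = _
    simp [g3, h2, h4, h1]
  have e3 : g3 (k + 3) = g3 (k + 2) := g3_skip (k + 2) (by omega)
  have e4 : g3 (k + 4) = g3 (k + 3) ++ [4, 4] := by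
    have h2 : ¬ (k + 3) % 5 = 2 := by omega
    have h4 : ¬ (k + 3) % 5 = 4 := by omega
    have h3 : (k + 3) % 5 = 3 := by omega
    show g3 ((k + 3) + 1) = _
    simp [g3, h2, h4, h3]
  have e5 : g3 (k + 5) = g3 (k + 4) ++ [5, 5, 3, 3] := by
    have h2 : ¬ (k + 4) % 5 = 2 := by omega
    have h4 : (k + 4) % 5 = 4 := by omega
    show g3 ((k + 4) + 1) = _
    simp [g3, h2, h4]
  rw [e5, e4, e3, e2, e1]
  simp

theorem g3_five_mul (q : Nat) :
    g3 (5 * q) = (List.replicate q ([3, 3, 1, 1, 2, 2, 4, 4, 5, 5] : List Int)).flatten ++ [3, 3] := by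
  induction q with
  | zero => rfl
  | succ q ih =>
    rw [show 5 * (q + 1) = 5 * q + 5 from by ring, g3_add_five (5 * q) (by omega), ih,
      List.replicate_succ', List.flatten_append]
    simp

theorem g3_prefix (k m : Nat) (h : k ≤ m) : g3 k <+: g3 m := by
  induction m with
  | zero => have : k = 0 := by omega
            subst this; exact List.prefix_rfl
  | succ m ih =>
    rcases Nat.lt_or_ge k (m + 1) with hk | hk
    · refine (ih (by omega)).trans ?_
      by_cases h2 : m % 5 = 2 <;> by_cases h4 : m % 5 = 4 <;> simp [g3, h2, h4]
    · have : k = m + 1 := by omega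
      subst this; exact List.prefix_rfl

theorem g3_length (k : Nat) :
    (g3 k).length = 2 + 2 * k - 2 * ((k + 2) / 5) + 2 * (k / 5) := by
  induction k with
  | zero => rfl
  | succ k ih =>
    by_cases h2 : k % 5 = 2 <;> by_cases h4 : k % 5 = 4 <;>
      simp [g3, h2, h4, ih] <;> omega

-- ---- the break-loops of second_man / third_man compute some g2/g3 stage of sufficient length ----
theorem loop2_spec (L : Nat) : ∀ d k : Nat, k + d = L + 1 →
    ∃ m, second_man_loop (L : Int) (PySem.List.pyRange (k : Int) ((L : Int) + 1) 1) (g2 k) = g2 m ∧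
      L ≤ (g2 m).length := by
  intro d
  induction d with
  | zero =>
    intro k hk
    have hkL : k = L + 1 := by omega
    subst hkL
    rw [PySem.List.pyRange_one_eq_nil (by push_cast; omega)]
    refine ⟨L + 1, rfl, ?_⟩
    have := g2_length (L + 1)
    omega
  | succ d ih =>
    intro k hk
    have hkL : k ≤ L := by omega
    rw [PySem.List.pyRange_one_cons (by push_cast; omega)]
    simp only [second_man_loop]
    by_cases hbreak : ((g2 k).length : Int) ≥ (L : Int)
    · rw [if_pos hbreak]
      exact ⟨k, rfl, by exact_mod_cast hbreak⟩
    · rw [if_neg hbreak]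
      have hcast : ((k : Int) + 1) = ((k + 1 : Nat) : Int) := by push_cast; ring
      by_cases h1 : k % 5 = 1
      · have ht : (PySem.Int.mod (k : Int) 5 + 1 == 2) = true := by
          have : PySem.Int.mod (k : Int) 5 = ((k % 5 : Nat) : Int) := by
            exact_mod_cast PySem.Int.mod_natCast k 5
          simp [this, h1] <;> omega
        rw [ht]
        simp only [if_true, hcast]
        rw [show g2 k = g2 (k + 1) from (g2_skip k h1).symm]
        exact ih (k + 1) (by omega)
      · have ht : (PySem.Int.mod (k : Int) 5 + 1 == 2) = false := by
          have : PySem.Int.mod (k : Int) 5 = ((k % 5 : Nat) : Int) := by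
            exact_mod_cast PySem.Int.mod_natCast k 5
          simp [this]
          omega
        rw [ht]
        simp only [if_false, hcast]
        have hg : g2 k ++ [2, PySem.Int.mod (k : Int) 5 + 1] = g2 (k + 1) := by
          have : PySem.Int.mod (k : Int) 5 = ((k % 5 : Nat) : Int) := by
            exact_mod_cast PySem.Int.mod_natCast k 5
          simp [g2, h1, this]
        rw [hg]
        exact ih (k + 1) (by omega)

theorem loop3_spec (L : Nat) : ∀ d k : Nat, k + d = L + 1 →
    ∃ m, third_man_loop (L : Int) (PySem.List.pyRange (k : Int) ((L : Int) + 1) 1) (g3 k) = g3 m ∧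
      L ≤ (g3 m).length := by
  intro d
  induction d with
  | zero =>
    intro k hk
    have hkL : k = L + 1 := by omega
    subst hkL
    rw [PySem.List.pyRange_one_eq_nil (by push_cast; omega)]
    refine ⟨L + 1, rfl, ?_⟩
    have := g3_length (L + 1)
    omega
  | succ d ih =>
    intro k hk
    have hkL : k ≤ L := by omega
    rw [PySem.List.pyRange_one_cons (by push_cast; omega)]
    simp only [third_man_loop]
    by_cases hbreak : ((g3 k).length : Int) ≥ (L : Int)
    · rw [if_pos hbreak]
      exact ⟨k, rfl, by exact_mod_cast hbreak⟩
    · rw [if_neg hbreak]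
      have hcast : ((k : Int) + 1) = ((k + 1 : Nat) : Int) := by push_cast; ring
      have hmod : PySem.Int.mod (k : Int) 5 = ((k % 5 : Nat) : Int) := by
        exact_mod_cast PySem.Int.mod_natCast k 5
      by_cases h2 : k % 5 = 2
      · have ht : (PySem.Int.mod (k : Int) 5 + 1 == 3) = true := by simp [hmod, h2] <;> omega
        rw [ht]
        simp only [if_true, hcast]
        rw [show g3 k = g3 (k + 1) from (g3_skip k h2).symm]
        exact ih (k + 1) (by omega)
      · have ht : (PySem.Int.mod (k : Int) 5 + 1 == 3) = false := by
          simp [hmod]; omega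
        rw [ht]
        simp only [if_false, hcast]
        by_cases h4 : k % 5 = 4
        · have h5 : (PySem.Int.mod (k : Int) 5 + 1 == 5) = true := by simp [hmod, h4] <;> omega
          have hg : (g3 k ++ [PySem.Int.mod (k : Int) 5 + 1, PySem.Int.mod (k : Int) 5 + 1]) ++ [3, 3]
              = g3 (k + 1) := by
            simp [g3, h2, h4, hmod] <;> omega
          simp only [h5, if_true]
          rw [hg]
          exact ih (k + 1) (by omega)
        · have h5 : (PySem.Int.mod (k : Int) 5 + 1 == 5) = false := by
            simp [hmod]; omega
          have hg : g3 k ++ [PySem.Int.mod (k : Int) 5 + 1, PySem.Int.mod (k : Int) 5 + 1]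
              = g3 (k + 1) := by
            simp [g3, h2, h4, hmod] <;> omega
          simp only [h5, if_false]
          rw [hg]
          exact ih (k + 1) (by omega)

-- ---- element characterization of the three generated sheets ----
theorem first_man_getD (L i : Nat) (h : i < L) :
    (first_man (L : Int)).getD i 0 = (([1, 2, 3, 4, 5] : List Int)).getD (i % 5) 0 := by
  unfold first_man
  rw [PySem.List.foldl_append_singleton_eq_map, PySem.List.pyRange_zero_natCast, List.map_map]
  rw [List.nil_append, List.getD_eq_getElem _ _ (by simpa using h)]
  simp only [List.getElem_map, List.getElem_range, Function.comp]
  have hmod : PySem.Int.mod (i : Int) 5 = ((i % 5 : Nat) : Int) := by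
    exact_mod_cast PySem.Int.mod_natCast i 5
  rw [hmod]
  have h5 : i % 5 = 0 ∨ i % 5 = 1 ∨ i % 5 = 2 ∨ i % 5 = 3 ∨ i % 5 = 4 := by omega
  rcases h5 with h5 | h5 | h5 | h5 | h5 <;> rw [h5] <;> rfl

theorem second_man_getD (L i : Nat) (h : i < L) :
    (second_man (L : Int)).getD i 0 = (([2, 1, 2, 3, 2, 4, 2, 5] : List Int)).getD (i % 8) 0 := by
  obtain ⟨m, hm, hlen⟩ := loop2_spec L (L + 1) 0 (by omega)
  have h0 : ((0 : Nat) : Int) = (0 : Int) := rfl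
  rw [h0] at hm
  have hg0 : g2 0 = [] := rfl
  rw [hg0] at hm
  unfold second_man
  rw [hm]
  have hi : i < (g2 m).length := by omega
  obtain ⟨t, ht⟩ := g2_prefix m (5 * (m + 1)) (by omega)
  have hgetD : (g2 m).getD i 0 = (g2 (5 * (m + 1))).getD i 0 := by
    rw [← ht, List.getD_append _ _ _ _ hi]
  rw [hgetD, g2_five_mul]
  have hlen2 : (g2 m).length ≤ (g2 (5 * (m + 1))).length := ht ▸ by simp
  have hlen3 : (g2 (5 * (m + 1))).length = (m + 1) * 8 := by
    rw [g2_five_mul]; simp [List.length_flatten, Nat.mul_comm]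
  exact getD_flatten_replicate _ (m + 1) i (by simp only [List.length_cons, List.length_nil]; omega)

theorem third_man_getD (L i : Nat) (h : i < L) :
    (third_man (L : Int)).getD i 0 = (([3, 3, 1, 1, 2, 2, 4, 4, 5, 5] : List Int)).getD (i % 10) 0 := by
  obtain ⟨m, hm, hlen⟩ := loop3_spec L (L + 1) 0 (by omega)
  have h0 : ((0 : Nat) : Int) = (0 : Int) := rfl
  rw [h0] at hm
  have hg0 : g3 0 = [3, 3] := rfl
  rw [hg0] at hm
  unfold third_man
  rw [hm]
  have hi : i < (g3 m).length := by omega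
  obtain ⟨t, ht⟩ := g3_prefix m (5 * (m + 1)) (by omega)
  have hgetD : (g3 m).getD i 0 = (g3 (5 * (m + 1))).getD i 0 := by
    rw [← ht, List.getD_append _ _ _ _ hi]
  rw [hgetD, g3_five_mul]
  have hlen2 : (g3 m).length ≤ (g3 (5 * (m + 1))).length := ht ▸ by simp
  have hlen3 : (g3 (5 * (m + 1))).length = (m + 1) * 10 + 2 := by
    rw [g3_five_mul]; simp [List.length_flatten, Nat.mul_comm]
  by_cases hcase : i < (m + 1) * 10
  · rw [List.getD_append _ _ _ _ (by simp [List.length_flatten, Nat.mul_comm]; omega)]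
    exact getD_flatten_replicate _ (m + 1) i (by simp only [List.length_cons, List.length_nil]; omega)
  · have hflatlen : ((List.replicate (m + 1) ([3, 3, 1, 1, 2, 2, 4, 4, 5, 5] : List Int)).flatten).length = (m + 1) * 10 := by
      simp [List.length_flatten, Nat.mul_comm]
    rw [List.getD_append_right _ _ _ _ (by omega)]
    rw [hflatlen]
    have hr : i - (m + 1) * 10 = 0 ∨ i - (m + 1) * 10 = 1 := by omega
    have hmod10 : i % 10 = i - (m + 1) * 10 := by omega
    rcases hr with hr | hr <;> rw [hr, hmod10, hr] <;> rfl

-- ---- A's interleaved scoring loop computes the three cyclic match counts ----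
theorem a_loop (answers : List Int) (n : Nat) (hn : n ≤ answers.length) :
    (PySem.List.pyRange 0 ((n : Nat) : Int) 1).foldl (fun sl num =>
      let question := PySem.List.pyGetD answers num 0
      let sl := if PySem.List.pyGetD (first_man ((answers.length : Nat) : Int)) num 0 == question then sl.set 0 (sl.getD 0 0 + 1) else sl
      let sl := if PySem.List.pyGetD (second_man ((answers.length : Nat) : Int)) num 0 == question then sl.set 1 (sl.getD 1 0 + 1) else sl
      let sl := if PySem.List.pyGetD (third_man ((answers.length : Nat) : Int)) num 0 == question then sl.set 2 (sl.getD 2 0 + 1) else sl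
      sl) ([0, 0, 0] : List Int)
    = [cnt [1, 2, 3, 4, 5] answers n, cnt [2, 1, 2, 3, 2, 4, 2, 5] answers n,
       cnt [3, 3, 1, 1, 2, 2, 4, 4, 5, 5] answers n] := by
  induction n with
  | zero =>
    rw [show (((0 : Nat) : Int)) = (0 : Int) from rfl, PySem.List.pyRange_one_eq_nil le_rfl]
    rfl
  | succ n ih =>
    have hn' : n ≤ answers.length := by omega
    rw [show (((n + 1 : Nat)) : Int) = ((n : Nat) : Int) + 1 from by push_cast; ring,
        PySem.List.pyRange_one_succ_right (Int.natCast_nonneg n), List.foldl_append,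
        ih hn', List.foldl_cons, List.foldl_nil]
    have hq : PySem.List.pyGetD answers ((n : Nat) : Int) 0 = answers.getD n 0 :=
      PySem.List.pyGetD_natCast answers n 0
    have h1 : PySem.List.pyGetD (first_man ((answers.length : Nat) : Int)) ((n : Nat) : Int) 0
        = ([1, 2, 3, 4, 5] : List Int).getD (n % 5) 0 := by
      rw [PySem.List.pyGetD_natCast]; exact first_man_getD _ _ (by omega)
    have h2 : PySem.List.pyGetD (second_man ((answers.length : Nat) : Int)) ((n : Nat) : Int) 0
        = ([2, 1, 2, 3, 2, 4, 2, 5] : List Int).getD (n % 8) 0 := by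
      rw [PySem.List.pyGetD_natCast]; exact second_man_getD _ _ (by omega)
    have h3 : PySem.List.pyGetD (third_man ((answers.length : Nat) : Int)) ((n : Nat) : Int) 0
        = ([3, 3, 1, 1, 2, 2, 4, 4, 5, 5] : List Int).getD (n % 10) 0 := by
      rw [PySem.List.pyGetD_natCast]; exact third_man_getD _ _ (by omega)
    rw [cnt_succ, cnt_succ, cnt_succ]
    simp only [hq, h1, h2, h3, List.length_cons, List.length_nil]
    norm_num
    split_ifs <;> simp [List.set]

-- ---- B's per-student pass computes the same cyclic match count ----
theorem cnt_append (p xs : List Int) (x : Int) (n : Nat) (h : n ≤ xs.length) :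
    cnt p (xs ++ [x]) n = cnt p xs n := by
  unfold cnt
  congr 2
  apply List.filter_congr
  intro i hi
  simp only [List.mem_range] at hi
  rw [List.getD_append _ _ _ _ (by omega)]

theorem b_fold (p xs : List Int) : ∀ s0 : Int,
    (PySem.List.enumerate xs 0).foldl (fun s ia =>
      if PySem.List.pyGetD p (PySem.Int.mod ia.1 ((p.length : Nat) : Int)) 0 == ia.2 then s + 1
      else s) s0
    = s0 + cnt p xs xs.length := by
  induction xs using List.reverseRecOn with
  | nil => intro s0; simp [PySem.List.enumerate, cnt]
  | append_singleton xs x ih =>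
    intro s0
    rw [PySem.List.enumerate_append]
    rw [List.foldl_append]
    rw [ih s0]
    have he : PySem.List.enumerate [x] ((0 : Int) + (xs.length : Int)) = [(((xs.length : Nat) : Int), x)] := by
      simp [PySem.List.enumerate_cons, PySem.List.enumerate_nil]
    rw [he, List.foldl_cons, List.foldl_nil]
    have hmod : PySem.Int.mod ((xs.length : Nat) : Int) ((p.length : Nat) : Int)
        = ((xs.length % p.length : Nat) : Int) := PySem.Int.mod_natCast _ _
    have hg : PySem.List.pyGetD p (((xs.length % p.length : Nat)) : Int) 0
        = p.getD (xs.length % p.length) 0 := PySem.List.pyGetD_natCast _ _ _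
    have hlen : (xs ++ [x]).length = xs.length + 1 := by simp
    rw [hlen, cnt_succ, cnt_append p xs x xs.length le_rfl]
    have hx : (xs ++ [x]).getD xs.length 0 = x := by
      rw [List.getD_append_right _ _ _ _ le_rfl]
      simp
    rw [hmod, hg, hx]
    split_ifs <;> ring

theorem countScore_eq (answers p : List Int) :
    countScore answers p = cnt p answers answers.length := by
  unfold countScore
  rw [b_fold p answers 0]
  ring

-- ---- the two tails (max + select) agree on any three scores ----
theorem tails_eq (s1 s2 s3 m : Int) :
    (PySem.List.pyRange 0 3 1).foldl (fun answer n =>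
      if PySem.List.pyGetD [s1, s2, s3] n 0 == m then answer ++ [n + 1] else answer) ([] : List Int)
    = ((List.range 3).filter (fun k => ([s1, s2, s3] : List Int).getD k 0 == m)).map
        (fun k => ((k : Nat) : Int) + 1) := by
  rw [show PySem.List.pyRange 0 3 1 = [0, 1, 2] from rfl,
      show List.range 3 = [0, 1, 2] from rfl]
  simp only [List.foldl_cons, List.foldl_nil, List.filter, List.map]
  rw [show PySem.List.pyGetD ([s1, s2, s3] : List Int) 0 0 = s1 from rfl,
      show PySem.List.pyGetD ([s1, s2, s3] : List Int) 1 0 = s2 from rfl,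
      show PySem.List.pyGetD ([s1, s2, s3] : List Int) 2 0 = s3 from rfl,
      show ([s1, s2, s3] : List Int).getD 0 0 = s1 from rfl,
      show ([s1, s2, s3] : List Int).getD 1 0 = s2 from rfl,
      show ([s1, s2, s3] : List Int).getD 2 0 = s3 from rfl]
  cases h1 : (s1 == m) <;> cases h2 : (s2 == m) <;> cases h3 : (s3 == m) <;> simp [h1, h2, h3]

theorem solution_spec : Claim_equal_solution := by
  intro answers _
  unfold Spec_solution solution solution_alt
  dsimp only
  rw [a_loop answers answers.length le_rfl]
  simp only [List.map_cons, List.map_nil]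
  rw [countScore_eq answers [1, 2, 3, 4, 5], countScore_eq answers [2, 1, 2, 3, 2, 4, 2, 5],
      countScore_eq answers [3, 3, 1, 1, 2, 2, 4, 4, 5, 5]]
  exact tails_eq _ _ _ _
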